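-- pv_equiv track=rewrite | github.com/nilanjanajui/Project--DataBase-Design-Studio | DBMS Project/backend/fd_modified.py | attr_closure_d
-- ===== SOURCE A (Python) =====
-- from typing import List, Set, Tuple, Dict, FrozenSet
--
-- FD = Tuple[FrozenSet[str], FrozenSet[str]]
--
-- def closure(attributes: Set[str], fds: List[FD]) -> Set[str]:
--     """
--     Compute attribute closure for a given set of attributes using provided FDs.
--     """
--     result = set(attributes)
--     while True:
--         added = False
--         for lhs, rhs in fds:
--             if lhs.issubset(result) and not rhs.issubset(result):
--                 result.update(rhs)
--                 added = True
--         if not added: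
--             break
--     return result
--
-- def project_fds_on_schema(fds: List[FD], schema: Set[str]) -> List[FD]:
--     """
--     Return FDs applicable to a subset of attributes (schema).
--     """
--     return [
--         (lhs, rhs) for lhs, rhs in fds if lhs.issubset(schema) and rhs.issubset(schema)
--     ]
--
-- def attr_closure_d(
--     attributes: Set[str], fds: List[FD], relations: List[Set[str]]
-- ) -> Set[str]:
--     """
--     Dependency preservation test used in decomposition.
--     """
--     result = set(attributes)
--     changed = True
--     while changed:
--         changed = False
--         for rel in relations:
--             relevant_fds = project_fds_on_schema(fds, rel)
--             sub_attrs = result & rel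
--             expanded = closure(sub_attrs, relevant_fds) & rel
--             new_result = result | expanded
--             if new_result != result:
--                 result = new_result
--                 changed = True
--     return result
-- ===== SOURCE B (Python) =====
-- def attr_closure_d(attributes, fds, relations):
--     """
--     Dependency preservation test used in decomposition.
--
--     Project the FDs onto the decomposed schemas once, then run a single
--     worklist closure over the combined projected FD list: an FD whose
--     left side is already covered fires at most once and is dropped from
--     the worklist, instead of being re-projected and re-scanned on every
--     outer iteration.
--     """
--     pending = [
--         (lhs, rhs)
--         for rel in relations
--         for lhs, rhs in fds
--         if lhs <= rel and rhs <= rel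
--     ]
--     result = set(attributes)
--     changed = True
--     while changed:
--         changed = False
--         remaining = []
--         for lhs, rhs in pending:
--             if lhs <= result:
--                 if not rhs <= result:
--                     result |= rhs
--                     changed = True
--             else:
--                 remaining.append((lhs, rhs))
--         pending = remaining
--     return result
-- ===== Notes on version B (the rewrite author's own statement) =====
-- stated objective: faster
-- what changed: A re-projects the FD list onto every relation and reruns a per-relation inner closure on every outer iteration; B projects the FDs onto the decomposed schemas once and runs a single worklist closure over the combined list in which a fired FD is dropped from the worklist.
import Mathlib
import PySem

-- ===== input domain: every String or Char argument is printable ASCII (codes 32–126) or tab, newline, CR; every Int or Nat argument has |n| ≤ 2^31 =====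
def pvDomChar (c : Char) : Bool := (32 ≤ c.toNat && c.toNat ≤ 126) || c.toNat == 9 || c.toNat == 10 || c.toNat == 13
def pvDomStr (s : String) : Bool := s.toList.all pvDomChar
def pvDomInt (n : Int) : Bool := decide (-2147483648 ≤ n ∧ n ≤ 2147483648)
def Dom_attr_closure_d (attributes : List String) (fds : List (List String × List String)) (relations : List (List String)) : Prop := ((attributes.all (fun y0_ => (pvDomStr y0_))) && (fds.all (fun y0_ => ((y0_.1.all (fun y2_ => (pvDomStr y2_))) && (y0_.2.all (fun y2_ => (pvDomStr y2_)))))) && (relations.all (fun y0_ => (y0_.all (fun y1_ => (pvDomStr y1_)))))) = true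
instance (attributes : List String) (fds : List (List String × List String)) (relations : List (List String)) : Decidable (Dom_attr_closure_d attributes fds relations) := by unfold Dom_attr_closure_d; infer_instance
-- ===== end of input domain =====

-- B replaces A's nested fixpoint (re-projecting the FDs onto every relation on every outer
-- iteration and running an inner closure per relation) by one projection pass and a single
-- worklist closure in which a fired FD is dropped.  Both Pythons return a SET of strings;
-- a Python set's iteration order is not modelled, so both ports return the canonical sorted
-- linearization of that set value (outputs are compared as finite sets).

-- ===== PORT A =====
-- helper project_fds_on_schema
def pvProj (fds : List (List String × List String)) (schema : List String) : List (List String × List String) :=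
  fds.filter (fun fd => PySem.Set.issubset fd.1 schema && PySem.Set.issubset fd.2 schema)

-- one 'for lhs, rhs in fds' pass of helper closure's 'while True' body; state = (result, added)
def pvClosurePass (fds : List (List String × List String)) (st : List String × Bool) : List String × Bool :=
  fds.foldl (fun st fd =>
    if PySem.Set.issubset fd.1 st.1 && !PySem.Set.issubset fd.2 st.1 then
      (PySem.Set.update st.1 fd.2, true)
    else st) st

-- helper closure's 'while True: … if not added: break' loop, fuelled (fuel below always suffices)
def pvClosureLoop : Nat → List (List String × List String) → List String → List String
  | 0, _, result => result
  | fuel + 1, fds, result =>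
    let st := pvClosurePass fds (result, false)
    if st.2 then pvClosureLoop fuel fds st.1 else st.1

-- helper closure(attributes, fds)
def pvClosure (attributes : List String) (fds : List (List String × List String)) : List String :=
  pvClosureLoop ((attributes ++ fds.flatMap (fun fd => fd.2)).length + 1) fds (PySem.Set.ofList attributes)

-- one 'for rel in relations' pass of the 'while changed' body; state = (result, changed)
def pvOuterPass (fds : List (List String × List String)) (relations : List (List String))
    (st : List String × Bool) : List String × Bool :=
  relations.foldl (fun st rel =>
    let relevant_fds := pvProj fds rel
    let sub_attrs := PySem.Set.inter st.1 rel
    let expanded := PySem.Set.inter (pvClosure sub_attrs relevant_fds) rel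
    let new_result := PySem.Set.union st.1 expanded
    if PySem.Set.equal new_result st.1 then st else (new_result, true)) st

-- the 'while changed' loop, fuelled (the fuel passed below always suffices)
def pvOuterLoop : Nat → List (List String × List String) → List (List String) → List String → List String
  | 0, _, _, result => result
  | fuel + 1, fds, relations, result =>
    let st := pvOuterPass fds relations (result, false)
    if st.2 then pvOuterLoop fuel fds relations st.1 else st.1

def attr_closure_d (attributes : List String) (fds : List (List String × List String)) (relations : List (List String)) : List String :=
  let result := pvOuterLoop ((attributes ++ fds.flatMap (fun fd => fd.2)).length + 1) fds relations
    (PySem.Set.ofList attributes)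
  PySem.List.sorted result (fun x => x) false   -- canonical order of the returned set (iteration order of a Python set is not modelled)

-- ===== PORT B =====
-- one 'for lhs, rhs in pending' pass; state = (result, remaining, changed)
def pvBPass (pending : List (List String × List String))
    (st : List String × List (List String × List String) × Bool) :
    List String × List (List String × List String) × Bool :=
  pending.foldl (fun st fd =>
    if PySem.Set.issubset fd.1 st.1 then
      if !PySem.Set.issubset fd.2 st.1 then (PySem.Set.update st.1 fd.2, st.2.1, true) else st
    else (st.1, st.2.1 ++ [fd], st.2.2)) st

-- B's 'while changed' loop over the shrinking worklist, fuelled (the fuel below always suffices)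
def pvBLoop : Nat → List String → List (List String × List String) → List String
  | 0, result, _ => result
  | fuel + 1, result, pending =>
    let st := pvBPass pending (result, [], false)
    if st.2.2 then pvBLoop fuel st.1 st.2.1 else st.1

def attr_closure_d_alt (attributes : List String) (fds : List (List String × List String)) (relations : List (List String)) : List String :=
  let pending := relations.flatMap (fun rel =>
    fds.filter (fun fd => PySem.Set.issubset fd.1 rel && PySem.Set.issubset fd.2 rel))
  let result := pvBLoop ((attributes ++ fds.flatMap (fun fd => fd.2)).length + 1)
    (PySem.Set.ofList attributes) pending
  PySem.List.sorted result (fun x => x) false   -- canonical order of the returned set (iteration order of a Python set is not modelled)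

-- ===== PRECONDITION & SPEC =====
def Spec_attr_closure_d (attributes : List String) (fds : List (List String × List String)) (relations : List (List String)) (out : List String) : Prop := out = attr_closure_d_alt attributes fds relations
instance (attributes : List String) (fds : List (List String × List String)) (relations : List (List String)) (out : List String) : Decidable (Spec_attr_closure_d attributes fds relations out) := by unfold Spec_attr_closure_d; infer_instance

-- ===== CLAIM (what is proved, stated in full; the proofs are below) =====
def Claim_equal_attr_closure_d : Prop := ∀ (attributes : List String) (fds : List (List String × List String)) (relations : List (List String)), Dom_attr_closure_d attributes fds relations → Spec_attr_closure_d attributes fds relations (attr_closure_d attributes fds relations)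

-- ===== LEMMAS AND PROOFS =====

-- S is closed under the FD list F (as sets of attributes)
def pvClosed (F : List (List String × List String)) (S : List String) : Prop :=
  ∀ fd ∈ F, fd.1 ⊆ S → fd.2 ⊆ S

-- the combined projected FD list both fixpoints are least prefixpoints of
def pvG (fds : List (List String × List String)) (relations : List (List String)) : List (List String × List String) :=
  relations.flatMap (fun rel => pvProj fds rel)

theorem pv_sub_iff (a b : List String) : PySem.Set.issubset a b = true ↔ a ⊆ b := by
  rw [PySem.Set.issubset_iff]; exact ⟨fun h x hx => h x hx, fun h x hx => h hx⟩

theorem pv_sub_false_iff (a b : List String) : PySem.Set.issubset a b = false ↔ ¬ a ⊆ b := by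
  rw [← Bool.not_eq_true, not_iff_not, pv_sub_iff]

theorem pv_not_subset {a b : List String} (h : ¬ a ⊆ b) : ∃ x ∈ a, x ∉ b := by
  by_contra hno
  push_neg at hno
  exact h fun x hx => hno x hx

-- ---- Set.update facts ----
theorem pv_update_subset {s l T : List String} (hs : s ⊆ T) (hl : l ⊆ T) :
    PySem.Set.update s l ⊆ T := by
  intro x hx
  rcases (PySem.Set.mem_update _ _ _).1 hx with h | h
  · exact hs h
  · exact hl h

theorem pv_subset_update (s l : List String) : s ⊆ PySem.Set.update s l := by
  intro x hx; exact (PySem.Set.mem_update _ _ _).2 (Or.inl hx)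

theorem pv_subset_update_right (s l : List String) : l ⊆ PySem.Set.update s l := by
  intro x hx; exact (PySem.Set.mem_update _ _ _).2 (Or.inr hx)

theorem pv_length_update (s l : List String) : s.length ≤ (PySem.Set.update s l).length := by
  rw [PySem.Set.update_eq_append_filter, List.length_append]; omega

theorem pv_length_update_strict {s l : List String} {x : String}
    (hx : x ∈ l) (hxs : x ∉ s) : s.length < (PySem.Set.update s l).length := by
  rw [PySem.Set.update_eq_append_filter, List.length_append]
  have hmem : x ∈ (PySem.Set.ofList l).filter (fun y => !(PySem.Set.contains s y)) := by
    rw [List.mem_filter]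
    refine ⟨(PySem.Set.mem_ofList _ _).2 hx, ?_⟩
    simp only [Bool.not_eq_eq_eq_not, Bool.not_true]
    cases hc : PySem.Set.contains s x
    · rfl
    · exact absurd ((PySem.Set.contains_iff _ _).1 hc) hxs
  have : 0 < ((PySem.Set.ofList l).filter (fun y => !(PySem.Set.contains s y))).length :=
    List.length_pos_of_mem hmem
  omega

theorem pv_nodup_length_le {r U : List String} (hn : r.Nodup) (hsub : r ⊆ U) :
    r.length ≤ U.length := by
  have h1 : r.toFinset.card = r.length := List.toFinset_card_of_nodup hn
  have h2 : r.toFinset ⊆ U.toFinset := by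
    intro x hx; rw [List.mem_toFinset] at *; exact hsub hx
  have := Finset.card_le_card h2
  have := List.toFinset_card_le U
  omega

-- ---- closure pass ----
theorem pvClosurePass_grows (F : List (List String × List String)) (st : List String × Bool) :
    st.1 ⊆ (pvClosurePass F st).1 ∧ st.1.length ≤ (pvClosurePass F st).1.length := by
  induction F generalizing st with
  | nil => exact ⟨fun _ hx => hx, le_refl _⟩
  | cons fd F ih =>
    show st.1 ⊆ (pvClosurePass F _).1 ∧ st.1.length ≤ (pvClosurePass F _).1.length
    beta_reduce
    split_ifs with hc
    · obtain ⟨h1, h2⟩ := ih (PySem.Set.update st.1 fd.2, true)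
      exact ⟨List.Subset.trans (pv_subset_update _ _) h1,
        le_trans (pv_length_update _ _) h2⟩
    · exact ih st

theorem pvClosurePass_nodup (F : List (List String × List String)) (st : List String × Bool)
    (h : st.1.Nodup) : (pvClosurePass F st).1.Nodup := by
  induction F generalizing st with
  | nil => exact h
  | cons fd F ih =>
    show ((pvClosurePass F _).1).Nodup
    beta_reduce
    split_ifs with hc
    · exact ih (PySem.Set.update st.1 fd.2, true) (PySem.Set.nodup_update _ _ h)
    · exact ih st h

theorem pvClosurePass_subU (F : List (List String × List String)) (st : List String × Bool)
    {U : List String} (h : st.1 ⊆ U) (hF : ∀ fd ∈ F, fd.2 ⊆ U) :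
    (pvClosurePass F st).1 ⊆ U := by
  induction F generalizing st with
  | nil => exact h
  | cons fd F ih =>
    show (pvClosurePass F _).1 ⊆ U
    beta_reduce
    split_ifs with hc
    · exact ih (PySem.Set.update st.1 fd.2, true)
        (pv_update_subset h (hF fd List.mem_cons_self))
        (fun g hg => hF g (List.mem_cons_of_mem _ hg))
    · exact ih st h (fun g hg => hF g (List.mem_cons_of_mem _ hg))

theorem pvClosurePass_flag (F : List (List String × List String)) (st : List String × Bool)
    (h : st.2 = true) : (pvClosurePass F st).2 = true := by
  induction F generalizing st with
  | nil => exact h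
  | cons fd F ih =>
    show (pvClosurePass F _).2 = true
    beta_reduce
    split_ifs with hc
    · exact ih (PySem.Set.update st.1 fd.2, true) rfl
    · exact ih st h

theorem pvClosurePass_false (F : List (List String × List String)) (r : List String)
    (h : (pvClosurePass F (r, false)).2 = false) :
    (pvClosurePass F (r, false)).1 = r ∧ pvClosed F r := by
  induction F generalizing r with
  | nil => exact ⟨rfl, fun fd hfd => absurd hfd (List.not_mem_nil)⟩
  | cons fd F ih =>
    have hstep : pvClosurePass (fd :: F) (r, false) = pvClosurePass F
        (if PySem.Set.issubset fd.1 r && !PySem.Set.issubset fd.2 r then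
          (PySem.Set.update r fd.2, true) else (r, false)) := rfl
    rw [hstep] at h ⊢
    split_ifs at h ⊢ with hc
    · simp [pvClosurePass_flag F (PySem.Set.update r fd.2, true) rfl] at h
    · simp only [Bool.and_eq_true, Bool.not_eq_true', pv_sub_iff, pv_sub_false_iff] at hc
      push_neg at hc
      obtain ⟨h1, h2⟩ := ih r h
      refine ⟨h1, fun g hg => ?_⟩
      rcases List.mem_cons.1 hg with rfl | hg'
      · intro hl
        by_contra hr
        exact hr (hc hl)
      · exact h2 g hg'

theorem pvClosurePass_sound (F : List (List String × List String)) (st : List String × Bool)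
    {T : List String} (h : st.1 ⊆ T) (hT : pvClosed F T) : (pvClosurePass F st).1 ⊆ T := by
  induction F generalizing st with
  | nil => exact h
  | cons fd F ih =>
    show (pvClosurePass F _).1 ⊆ T
    beta_reduce
    have hTtail : pvClosed F T := fun g hg => hT g (List.mem_cons_of_mem _ hg)
    split_ifs with hc
    · have hl : fd.1 ⊆ st.1 := (pv_sub_iff _ _).1 (Bool.and_elim_left hc)
      have hr : fd.2 ⊆ T := hT fd List.mem_cons_self (List.Subset.trans hl h)
      exact ih (PySem.Set.update st.1 fd.2, true) (pv_update_subset h hr) hTtail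
    · exact ih st h hTtail

theorem pvClosurePass_strict (F : List (List String × List String)) (r : List String)
    (hn : r.Nodup) (h : (pvClosurePass F (r, false)).2 = true) :
    r.length < (pvClosurePass F (r, false)).1.length := by
  induction F generalizing r with
  | nil => exact absurd h (by simp [pvClosurePass])
  | cons fd F ih =>
    have hstep : pvClosurePass (fd :: F) (r, false) = pvClosurePass F
        (if PySem.Set.issubset fd.1 r && !PySem.Set.issubset fd.2 r then
          (PySem.Set.update r fd.2, true) else (r, false)) := rfl
    rw [hstep] at h ⊢
    split_ifs at h ⊢ with hc
    · have hns : ¬ fd.2 ⊆ r := by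
        have := Bool.and_elim_right hc
        rw [Bool.not_eq_true'] at this
        exact (pv_sub_false_iff _ _).1 this
      obtain ⟨x, hx, hxr⟩ := pv_not_subset hns
      have h1 := pv_length_update_strict hx hxr (s := r) (l := fd.2)
      have h2 := (pvClosurePass_grows F (PySem.Set.update r fd.2, true)).2
      exact lt_of_lt_of_le h1 h2
    · exact ih r hn h

-- ---- closure loop ----
theorem pvClosureLoop_succ (f : Nat) (F : List (List String × List String)) (r : List String) :
    pvClosureLoop (f + 1) F r =
      if (pvClosurePass F (r, false)).2 then pvClosureLoop f F (pvClosurePass F (r, false)).1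
      else (pvClosurePass F (r, false)).1 := rfl

theorem pvClosureLoop_grows (f : Nat) (F : List (List String × List String)) (r : List String) :
    r ⊆ pvClosureLoop f F r := by
  induction f generalizing r with
  | zero => exact fun _ hx => hx
  | succ f ih =>
    rw [pvClosureLoop_succ]
    have h1 := (pvClosurePass_grows F (r, false)).1
    split_ifs with hb
    · exact List.Subset.trans h1 (ih _)
    · exact h1

theorem pvClosureLoop_sound (f : Nat) (F : List (List String × List String)) (r : List String)
    {T : List String} (h : r ⊆ T) (hT : pvClosed F T) : pvClosureLoop f F r ⊆ T := by
  induction f generalizing r with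
  | zero => exact h
  | succ f ih =>
    rw [pvClosureLoop_succ]
    have h1 := pvClosurePass_sound F (r, false) h hT
    split_ifs with hb
    · exact ih _ h1
    · exact h1

theorem pvClosureLoop_subU (f : Nat) (F : List (List String × List String)) (r : List String)
    {U : List String} (h : r ⊆ U) (hF : ∀ fd ∈ F, fd.2 ⊆ U) : pvClosureLoop f F r ⊆ U := by
  induction f generalizing r with
  | zero => exact h
  | succ f ih =>
    rw [pvClosureLoop_succ]
    have h1 := pvClosurePass_subU F (r, false) h hF
    split_ifs with hb
    · exact ih _ h1
    · exact h1

theorem pvClosureLoop_complete (f : Nat) (F : List (List String × List String)) (r : List String)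
    {U : List String} (hn : r.Nodup) (h : r ⊆ U) (hF : ∀ fd ∈ F, fd.2 ⊆ U)
    (hf : U.length + 1 ≤ f + r.length) : pvClosed F (pvClosureLoop f F r) := by
  induction f generalizing r with
  | zero =>
    have := pv_nodup_length_le hn h
    omega
  | succ f ih =>
    rw [pvClosureLoop_succ]
    split_ifs with hb
    · exact ih _ (pvClosurePass_nodup F (r, false) hn) (pvClosurePass_subU F (r, false) h hF)
        (by have := pvClosurePass_strict F r hn hb; omega)
    · rw [Bool.not_eq_true] at hb
      obtain ⟨heq, hcl⟩ := pvClosurePass_false F r hb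
      rw [heq]
      exact hcl

-- ---- closure ----
theorem pvClosure_extensive (attrs : List String) (F : List (List String × List String)) :
    attrs ⊆ pvClosure attrs F := by
  intro x hx
  exact pvClosureLoop_grows _ _ _ ((PySem.Set.mem_ofList _ _).2 hx)

theorem pvClosure_sound (attrs : List String) (F : List (List String × List String))
    {T : List String} (h : attrs ⊆ T) (hT : pvClosed F T) : pvClosure attrs F ⊆ T := by
  exact pvClosureLoop_sound _ _ _ (fun x hx => h ((PySem.Set.mem_ofList _ _).1 hx)) hT

theorem pvClosure_closed (attrs : List String) (F : List (List String × List String)) :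
    pvClosed F (pvClosure attrs F) := by
  apply pvClosureLoop_complete (U := attrs ++ F.flatMap (fun fd => fd.2))
  · exact PySem.Set.nodup_ofList _
  · intro x hx
    exact List.mem_append_left _ ((PySem.Set.mem_ofList _ _).1 hx)
  · intro fd hfd x hx
    exact List.mem_append_right _ (List.mem_flatMap.2 ⟨fd, hfd, hx⟩)
  · omega

theorem pvClosure_subU (attrs : List String) (F : List (List String × List String)) :
    pvClosure attrs F ⊆ attrs ++ F.flatMap (fun fd => fd.2) := by
  apply pvClosureLoop_subU
  · intro x hx
    exact List.mem_append_left _ ((PySem.Set.mem_ofList _ _).1 hx)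
  · intro fd hfd x hx
    exact List.mem_append_right _ (List.mem_flatMap.2 ⟨fd, hfd, hx⟩)

-- ---- pvProj / pvG facts ----
theorem pvProj_mem {fds : List (List String × List String)} {rel : List String}
    {fd : List String × List String} (h : fd ∈ pvProj fds rel) :
    fd ∈ fds ∧ fd.1 ⊆ rel ∧ fd.2 ⊆ rel := by
  obtain ⟨h1, h2⟩ := List.mem_filter.1 h
  rw [Bool.and_eq_true, pv_sub_iff, pv_sub_iff] at h2
  exact ⟨h1, h2⟩

theorem pvG_mem {fds : List (List String × List String)} {relations : List (List String)}
    {fd : List String × List String} :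
    fd ∈ pvG fds relations ↔ ∃ rel ∈ relations, fd ∈ pvProj fds rel := by
  exact List.mem_flatMap

-- ---- outer step (the body of A's 'for rel in relations' loop, used only in proofs) ----
def pvOStep (fds : List (List String × List String)) (st : List String × Bool)
    (rel : List String) : List String × Bool :=
  if PySem.Set.equal
      (PySem.Set.union st.1 (PySem.Set.inter (pvClosure (PySem.Set.inter st.1 rel) (pvProj fds rel)) rel)) st.1 then st
  else
    (PySem.Set.union st.1 (PySem.Set.inter (pvClosure (PySem.Set.inter st.1 rel) (pvProj fds rel)) rel), true)

theorem pvOuterPass_cons (fds : List (List String × List String)) (rel : List String)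
    (rels : List (List String)) (st : List String × Bool) :
    pvOuterPass fds (rel :: rels) st = pvOuterPass fds rels (pvOStep fds st rel) := rfl

theorem pv_union_eq (s t : List String) : PySem.Set.union s t = PySem.Set.update s t := rfl

theorem pvOStep_grows (fds : List (List String × List String)) (st : List String × Bool)
    (rel : List String) :
    st.1 ⊆ (pvOStep fds st rel).1 ∧ st.1.length ≤ (pvOStep fds st rel).1.length := by
  unfold pvOStep
  split_ifs with hc
  · exact ⟨fun _ hx => hx, le_refl _⟩
  · rw [pv_union_eq]
    exact ⟨pv_subset_update _ _, pv_length_update _ _⟩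

theorem pvOStep_nodup (fds : List (List String × List String)) (st : List String × Bool)
    (rel : List String) (h : st.1.Nodup) : (pvOStep fds st rel).1.Nodup := by
  unfold pvOStep
  split_ifs with hc
  · exact h
  · exact PySem.Set.nodup_union _ _ h

theorem pvOStep_subU (fds : List (List String × List String)) (st : List String × Bool)
    (rel : List String) {U : List String} (h : st.1 ⊆ U)
    (hF : fds.flatMap (fun fd => fd.2) ⊆ U) : (pvOStep fds st rel).1 ⊆ U := by
  unfold pvOStep
  split_ifs with hc
  · exact h
  · rw [pv_union_eq]
    refine pv_update_subset h ?_
    intro x hx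
    have hx1 : x ∈ pvClosure (PySem.Set.inter st.1 rel) (pvProj fds rel) :=
      ((PySem.Set.mem_inter _ _ _).1 hx).1
    have := pvClosure_subU (PySem.Set.inter st.1 rel) (pvProj fds rel) hx1
    rcases List.mem_append.1 this with hsub | hrhs
    · exact h ((PySem.Set.mem_inter _ _ _).1 hsub).1
    · obtain ⟨fd, hfd, hxfd⟩ := List.mem_flatMap.1 hrhs
      exact hF (List.mem_flatMap.2 ⟨fd, (pvProj_mem hfd).1, hxfd⟩)

theorem pvOStep_flag (fds : List (List String × List String)) (st : List String × Bool)
    (rel : List String) (h : st.2 = true) : (pvOStep fds st rel).2 = true := by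
  unfold pvOStep
  split_ifs with hc
  · exact h
  · rfl

theorem pvOStep_sound (fds : List (List String × List String)) (st : List String × Bool)
    (rel : List String) {T : List String} (h : st.1 ⊆ T)
    (hT : pvClosed (pvProj fds rel) T) : (pvOStep fds st rel).1 ⊆ T := by
  unfold pvOStep
  split_ifs with hc
  · exact h
  · rw [pv_union_eq]
    refine pv_update_subset h ?_
    intro x hx
    have hx1 : x ∈ pvClosure (PySem.Set.inter st.1 rel) (pvProj fds rel) :=
      ((PySem.Set.mem_inter _ _ _).1 hx).1
    refine pvClosure_sound _ _ ?_ hT hx1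
    intro y hy
    exact h ((PySem.Set.mem_inter _ _ _).1 hy).1

theorem pvOStep_false (fds : List (List String × List String)) (r : List String)
    (rel : List String) (h : (pvOStep fds (r, false) rel).2 = false) :
    (pvOStep fds (r, false) rel).1 = r ∧
    PySem.Set.inter (pvClosure (PySem.Set.inter r rel) (pvProj fds rel)) rel ⊆ r := by
  unfold pvOStep at h ⊢
  split_ifs at h ⊢ with hc
  refine ⟨rfl, ?_⟩
  intro x hx
  have hx' : x ∈ PySem.Set.union r
      (PySem.Set.inter (pvClosure (PySem.Set.inter r rel) (pvProj fds rel)) rel) :=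
    (PySem.Set.mem_union _ _ _).2 (Or.inr hx)
  exact ((PySem.Set.equal_iff _ _).1 hc x).1 hx'

theorem pvOStep_strict (fds : List (List String × List String)) (r : List String)
    (rel : List String) (h : (pvOStep fds (r, false) rel).2 = true) :
    r.length < (pvOStep fds (r, false) rel).1.length := by
  unfold pvOStep at h ⊢
  split_ifs at h ⊢ with hc
  rw [pv_union_eq]
  have hne : ¬ ∀ x, (x ∈ PySem.Set.union r
      (PySem.Set.inter (pvClosure (PySem.Set.inter r rel) (pvProj fds rel)) rel) ↔ x ∈ r) := by
    intro hall
    exact hc ((PySem.Set.equal_iff _ _).2 hall)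
  push_neg at hne
  obtain ⟨x, hx⟩ := hne
  rcases hx with ⟨hxm, hxr⟩ | ⟨hnm, hxr⟩
  · have hxe : x ∈ PySem.Set.inter (pvClosure (PySem.Set.inter r rel) (pvProj fds rel)) rel := by
      rcases (PySem.Set.mem_union _ _ _).1 hxm with h1 | h1
      · exact absurd h1 hxr
      · exact h1
    exact pv_length_update_strict hxe hxr
  · exact absurd ((PySem.Set.mem_union _ _ _).2 (Or.inl hxr)) hnm

-- ---- outer pass ----
theorem pvOuterPass_grows (fds : List (List String × List String)) (rels : List (List String))
    (st : List String × Bool) :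
    st.1 ⊆ (pvOuterPass fds rels st).1 ∧ st.1.length ≤ (pvOuterPass fds rels st).1.length := by
  induction rels generalizing st with
  | nil => exact ⟨fun _ hx => hx, le_refl _⟩
  | cons rel rels ih =>
    rw [pvOuterPass_cons]
    obtain ⟨h1, h2⟩ := pvOStep_grows fds st rel
    obtain ⟨h3, h4⟩ := ih (pvOStep fds st rel)
    exact ⟨List.Subset.trans h1 h3, le_trans h2 h4⟩

theorem pvOuterPass_nodup (fds : List (List String × List String)) (rels : List (List String))
    (st : List String × Bool) (h : st.1.Nodup) : (pvOuterPass fds rels st).1.Nodup := by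
  induction rels generalizing st with
  | nil => exact h
  | cons rel rels ih =>
    rw [pvOuterPass_cons]
    exact ih _ (pvOStep_nodup fds st rel h)

theorem pvOuterPass_subU (fds : List (List String × List String)) (rels : List (List String))
    (st : List String × Bool) {U : List String} (h : st.1 ⊆ U)
    (hF : fds.flatMap (fun fd => fd.2) ⊆ U) : (pvOuterPass fds rels st).1 ⊆ U := by
  induction rels generalizing st with
  | nil => exact h
  | cons rel rels ih =>
    rw [pvOuterPass_cons]
    exact ih _ (pvOStep_subU fds st rel h hF)

theorem pvOuterPass_flag (fds : List (List String × List String)) (rels : List (List String))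
    (st : List String × Bool) (h : st.2 = true) : (pvOuterPass fds rels st).2 = true := by
  induction rels generalizing st with
  | nil => exact h
  | cons rel rels ih =>
    rw [pvOuterPass_cons]
    exact ih _ (pvOStep_flag fds st rel h)

theorem pvOuterPass_false (fds : List (List String × List String)) (rels : List (List String))
    (r : List String) (h : (pvOuterPass fds rels (r, false)).2 = false) :
    (pvOuterPass fds rels (r, false)).1 = r ∧
    ∀ rel ∈ rels, PySem.Set.inter (pvClosure (PySem.Set.inter r rel) (pvProj fds rel)) rel ⊆ r := by
  induction rels generalizing r with
  | nil => exact ⟨rfl, fun rel hrel => absurd hrel (List.not_mem_nil)⟩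
  | cons rel rels ih =>
    rw [pvOuterPass_cons] at h ⊢
    cases hb : (pvOStep fds (r, false) rel).2 with
    | true =>
      have := pvOuterPass_flag fds rels _ hb
      rw [h] at this
      cases this
    | false =>
      obtain ⟨heq, hexp⟩ := pvOStep_false fds r rel hb
      have hst : pvOStep fds (r, false) rel = (r, false) := by
        have h2 := heq
        cases hstep : pvOStep fds (r, false) rel with
        | mk a b =>
          rw [hstep] at hb h2
          simp at hb h2
          rw [h2, hb]
      rw [hst] at h ⊢
      obtain ⟨h1, h2⟩ := ih r h
      refine ⟨h1, fun rel' hrel' => ?_⟩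
      rcases List.mem_cons.1 hrel' with rfl | hrel''
      · exact hexp
      · exact h2 rel' hrel''

theorem pvOuterPass_sound (fds : List (List String × List String)) (rels : List (List String))
    (st : List String × Bool) {T : List String} (h : st.1 ⊆ T)
    (hT : ∀ rel ∈ rels, pvClosed (pvProj fds rel) T) : (pvOuterPass fds rels st).1 ⊆ T := by
  induction rels generalizing st with
  | nil => exact h
  | cons rel rels ih =>
    rw [pvOuterPass_cons]
    exact ih _ (pvOStep_sound fds st rel h (hT rel List.mem_cons_self))
      (fun rel' hrel' => hT rel' (List.mem_cons_of_mem _ hrel'))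

theorem pvOuterPass_strict (fds : List (List String × List String)) (rels : List (List String))
    (r : List String) (hn : r.Nodup) (h : (pvOuterPass fds rels (r, false)).2 = true) :
    r.length < (pvOuterPass fds rels (r, false)).1.length := by
  induction rels generalizing r with
  | nil => exact absurd h (by simp [pvOuterPass])
  | cons rel rels ih =>
    rw [pvOuterPass_cons] at h ⊢
    cases hb : (pvOStep fds (r, false) rel).2 with
    | true =>
      have h1 := pvOStep_strict fds r rel hb
      have h2 := (pvOuterPass_grows fds rels (pvOStep fds (r, false) rel)).2
      omega
    | false =>
      obtain ⟨heq, _⟩ := pvOStep_false fds r rel hb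
      have hst : pvOStep fds (r, false) rel = (r, false) := by
        cases hstep : pvOStep fds (r, false) rel with
        | mk a b =>
          rw [hstep] at hb heq
          simp at hb heq
          rw [heq, hb]
      rw [hst] at h ⊢
      exact ih r hn h

-- ---- outer loop ----
theorem pvOuterLoop_grows (f : Nat) (fds : List (List String × List String))
    (rels : List (List String)) (r : List String) : r ⊆ pvOuterLoop f fds rels r := by
  induction f generalizing r with
  | zero => exact fun _ hx => hx
  | succ f ih =>
    show r ⊆ (if (pvOuterPass fds rels (r, false)).2 then
      pvOuterLoop f fds rels (pvOuterPass fds rels (r, false)).1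
      else (pvOuterPass fds rels (r, false)).1)
    have h1 := (pvOuterPass_grows fds rels (r, false)).1
    split_ifs with hb
    · exact List.Subset.trans h1 (ih _)
    · exact h1

theorem pvOuterLoop_sound (f : Nat) (fds : List (List String × List String))
    (rels : List (List String)) (r : List String) {T : List String} (h : r ⊆ T)
    (hT : ∀ rel ∈ rels, pvClosed (pvProj fds rel) T) : pvOuterLoop f fds rels r ⊆ T := by
  induction f generalizing r with
  | zero => exact h
  | succ f ih =>
    show (if (pvOuterPass fds rels (r, false)).2 then
      pvOuterLoop f fds rels (pvOuterPass fds rels (r, false)).1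
      else (pvOuterPass fds rels (r, false)).1) ⊆ T
    have h1 := pvOuterPass_sound fds rels (r, false) h hT
    split_ifs with hb
    · exact ih _ h1
    · exact h1

theorem pvOuterLoop_nodup (f : Nat) (fds : List (List String × List String))
    (rels : List (List String)) (r : List String) (hn : r.Nodup) :
    (pvOuterLoop f fds rels r).Nodup := by
  induction f generalizing r with
  | zero => exact hn
  | succ f ih =>
    show (if (pvOuterPass fds rels (r, false)).2 then
      pvOuterLoop f fds rels (pvOuterPass fds rels (r, false)).1
      else (pvOuterPass fds rels (r, false)).1).Nodup
    have h1 := pvOuterPass_nodup fds rels (r, false) hn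
    split_ifs with hb
    · exact ih _ h1
    · exact h1

theorem pvOuterLoop_complete (f : Nat) (fds : List (List String × List String))
    (rels : List (List String)) (r : List String) {U : List String}
    (hn : r.Nodup) (h : r ⊆ U) (hF : fds.flatMap (fun fd => fd.2) ⊆ U)
    (hf : U.length + 1 ≤ f + r.length) :
    pvClosed (pvG fds rels) (pvOuterLoop f fds rels r) := by
  induction f generalizing r with
  | zero =>
    have := pv_nodup_length_le hn h
    omega
  | succ f ih =>
    show pvClosed _ (if (pvOuterPass fds rels (r, false)).2 then
      pvOuterLoop f fds rels (pvOuterPass fds rels (r, false)).1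
      else (pvOuterPass fds rels (r, false)).1)
    split_ifs with hb
    · exact ih _ (pvOuterPass_nodup fds rels (r, false) hn)
        (pvOuterPass_subU fds rels (r, false) h hF)
        (by have := pvOuterPass_strict fds rels r hn hb; omega)
    · rw [Bool.not_eq_true] at hb
      obtain ⟨heq, hexp⟩ := pvOuterPass_false fds rels r hb
      rw [heq]
      intro fd hfd hl
      obtain ⟨rel, hrel, hfd'⟩ := pvG_mem.1 hfd
      obtain ⟨hfds, hl_rel, hr_rel⟩ := pvProj_mem hfd'
      have hsub : fd.1 ⊆ PySem.Set.inter r rel := fun y hy =>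
        (PySem.Set.mem_inter _ _ _).2 ⟨hl hy, hl_rel hy⟩
      have hcl : fd.2 ⊆ pvClosure (PySem.Set.inter r rel) (pvProj fds rel) :=
        pvClosure_closed _ _ fd hfd' (List.Subset.trans hsub (pvClosure_extensive _ _))
      intro x hx
      exact hexp rel hrel ((PySem.Set.mem_inter _ _ _).2 ⟨hcl hx, hr_rel hx⟩)

-- ---- B step (the body of B's 'for lhs, rhs in pending' loop, used only in proofs) ----
def pvBStep (st : List String × List (List String × List String) × Bool)
    (fd : List String × List String) : List String × List (List String × List String) × Bool :=
  if PySem.Set.issubset fd.1 st.1 then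
    if !PySem.Set.issubset fd.2 st.1 then (PySem.Set.update st.1 fd.2, st.2.1, true) else st
  else (st.1, st.2.1 ++ [fd], st.2.2)

theorem pvBPass_cons (fd : List String × List String) (p : List (List String × List String))
    (st : List String × List (List String × List String) × Bool) :
    pvBPass (fd :: p) st = pvBPass p (pvBStep st fd) := rfl

theorem pvBStep_grows (st : List String × List (List String × List String) × Bool)
    (fd : List String × List String) :
    st.1 ⊆ (pvBStep st fd).1 ∧ st.1.length ≤ (pvBStep st fd).1.length := by
  unfold pvBStep
  split_ifs with h1 h2
  · exact ⟨pv_subset_update _ _, pv_length_update _ _⟩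
  · exact ⟨fun _ hx => hx, le_refl _⟩
  · exact ⟨fun _ hx => hx, le_refl _⟩

theorem pvBStep_rem (st : List String × List (List String × List String) × Bool)
    (fd : List String × List String) :
    st.2.1 ⊆ (pvBStep st fd).2.1 ∧ (pvBStep st fd).2.1 ⊆ st.2.1 ++ [fd] := by
  unfold pvBStep
  split_ifs with h1 h2
  · exact ⟨fun _ hx => hx, fun _ hx => List.mem_append_left _ hx⟩
  · exact ⟨fun _ hx => hx, fun _ hx => List.mem_append_left _ hx⟩
  · exact ⟨fun _ hx => List.mem_append_left _ hx, fun _ hx => hx⟩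
theorem pvBPass_grows (p : List (List String × List String))
    (st : List String × List (List String × List String) × Bool) :
    st.1 ⊆ (pvBPass p st).1 ∧ st.1.length ≤ (pvBPass p st).1.length := by
  induction p generalizing st with
  | nil => exact ⟨fun _ hx => hx, le_refl _⟩
  | cons fd p ih =>
    rw [pvBPass_cons]
    obtain ⟨h1, h2⟩ := pvBStep_grows st fd
    obtain ⟨h3, h4⟩ := ih (pvBStep st fd)
    exact ⟨List.Subset.trans h1 h3, le_trans h2 h4⟩

theorem pvBPass_nodup (p : List (List String × List String))
    (st : List String × List (List String × List String) × Bool) (h : st.1.Nodup) :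
    (pvBPass p st).1.Nodup := by
  induction p generalizing st with
  | nil => exact h
  | cons fd p ih =>
    rw [pvBPass_cons]
    refine ih _ ?_
    unfold pvBStep
    split_ifs with h1 h2
    · exact PySem.Set.nodup_update _ _ h
    · exact h
    · exact h

theorem pvBPass_subU (p : List (List String × List String))
    (st : List String × List (List String × List String) × Bool) {U : List String}
    (h : st.1 ⊆ U) (hF : ∀ fd ∈ p, fd.2 ⊆ U) : (pvBPass p st).1 ⊆ U := by
  induction p generalizing st with
  | nil => exact h
  | cons fd p ih =>
    rw [pvBPass_cons]
    refine ih _ ?_ (fun g hg => hF g (List.mem_cons_of_mem _ hg))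
    unfold pvBStep
    split_ifs with h1 h2
    · exact pv_update_subset h (hF fd List.mem_cons_self)
    · exact h
    · exact h

theorem pvBPass_rem (p : List (List String × List String))
    (st : List String × List (List String × List String) × Bool) :
    (pvBPass p st).2.1 ⊆ st.2.1 ++ p := by
  induction p generalizing st with
  | nil => exact fun _ hx => List.mem_append_left _ hx
  | cons fd p ih =>
    rw [pvBPass_cons]
    intro x hx
    have := ih (pvBStep st fd) hx
    rcases List.mem_append.1 this with h1 | h1
    · rcases List.mem_append.1 ((pvBStep_rem st fd).2 h1) with h2 | h2
      · exact List.mem_append_left _ h2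
      · rcases List.mem_singleton.1 h2 with rfl
        exact List.mem_append_right _ List.mem_cons_self
    · exact List.mem_append_right _ (List.mem_cons_of_mem _ h1)

theorem pvBPass_flag (p : List (List String × List String))
    (st : List String × List (List String × List String) × Bool) (h : st.2.2 = true) :
    (pvBPass p st).2.2 = true := by
  induction p generalizing st with
  | nil => exact h
  | cons fd p ih =>
    rw [pvBPass_cons]
    refine ih _ ?_
    unfold pvBStep
    split_ifs with h1 h2
    · rfl
    · exact h
    · exact h

theorem pvBPass_rem_grows (p : List (List String × List String))
    (st : List String × List (List String × List String) × Bool) :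
    st.2.1 ⊆ (pvBPass p st).2.1 ∧ st.1 ⊆ (pvBPass p st).1 := by
  induction p generalizing st with
  | nil => exact ⟨fun _ hx => hx, fun _ hx => hx⟩
  | cons fd p ih =>
    rw [pvBPass_cons]
    obtain ⟨h1, h2⟩ := ih (pvBStep st fd)
    exact ⟨List.Subset.trans (pvBStep_rem st fd).1 h1,
      List.Subset.trans (pvBStep_grows st fd).1 h2⟩

theorem pvBPass_inv (p : List (List String × List String))
    (st : List String × List (List String × List String) × Bool) :
    ∀ fd ∈ p, fd ∈ (pvBPass p st).2.1 ∨ fd.2 ⊆ (pvBPass p st).1 := by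
  induction p generalizing st with
  | nil => exact fun fd hfd => absurd hfd (List.not_mem_nil)
  | cons fd p ih =>
    rw [pvBPass_cons]
    intro g hg
    rcases List.mem_cons.1 hg with rfl | hg'
    · -- the head fd is dealt with by its own step, then persists
      have hrem := (pvBPass_rem_grows p (pvBStep st g)).1
      have hres := (pvBPass_grows p (pvBStep st g)).1
      unfold pvBStep at hrem hres ⊢
      split_ifs at hrem hres ⊢ with h1 h2
      · exact Or.inr (List.Subset.trans (pv_subset_update_right _ _) hres)
      · rw [Bool.not_eq_true'] at h2
        exact Or.inr (List.Subset.trans ((pv_sub_iff _ _).1 (by simpa using h2)) hres)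
      · exact Or.inl (hrem (List.mem_append_right _ (List.mem_singleton.2 rfl)))
    · exact ih _ g hg'

theorem pvBPass_sound (p : List (List String × List String))
    (st : List String × List (List String × List String) × Bool) {T : List String}
    (h : st.1 ⊆ T) (hT : pvClosed p T) : (pvBPass p st).1 ⊆ T := by
  induction p generalizing st with
  | nil => exact h
  | cons fd p ih =>
    rw [pvBPass_cons]
    refine ih _ ?_ (fun g hg => hT g (List.mem_cons_of_mem _ hg))
    unfold pvBStep
    split_ifs with h1 h2
    · exact pv_update_subset h
        (hT fd List.mem_cons_self (List.Subset.trans ((pv_sub_iff _ _).1 h1) h))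
    · exact h
    · exact h

theorem pvBPass_false (p : List (List String × List String)) (r : List String)
    (rem : List (List String × List String))
    (h : (pvBPass p (r, rem, false)).2.2 = false) :
    (pvBPass p (r, rem, false)).1 = r ∧ pvClosed p r := by
  induction p generalizing r rem with
  | nil => exact ⟨rfl, fun fd hfd => absurd hfd (List.not_mem_nil)⟩
  | cons fd p ih =>
    rw [pvBPass_cons] at h ⊢
    unfold pvBStep at h ⊢
    split_ifs at h ⊢ with h1 h2
    · simp [pvBPass_flag p (PySem.Set.update r fd.2, rem, true) rfl] at h
    · rw [Bool.not_eq_true'] at h2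
      obtain ⟨hh1, hh2⟩ := ih r rem h
      refine ⟨hh1, fun g hg => ?_⟩
      rcases List.mem_cons.1 hg with rfl | hg'
      · exact fun _ => (pv_sub_iff _ _).1 (by simpa using h2)
      · exact hh2 g hg'
    · obtain ⟨hh1, hh2⟩ := ih r (rem ++ [fd]) h
      refine ⟨hh1, fun g hg => ?_⟩
      rcases List.mem_cons.1 hg with rfl | hg'
      · intro hl
        exact absurd ((pv_sub_iff _ _).2 hl) (by simpa using h1)
      · exact hh2 g hg'

theorem pvBPass_strict (p : List (List String × List String)) (r : List String)
    (rem : List (List String × List String)) (hn : r.Nodup)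
    (h : (pvBPass p (r, rem, false)).2.2 = true) :
    r.length < (pvBPass p (r, rem, false)).1.length := by
  induction p generalizing r rem with
  | nil => exact absurd h (by simp [pvBPass])
  | cons fd p ih =>
    rw [pvBPass_cons] at h ⊢
    unfold pvBStep at h ⊢
    split_ifs at h ⊢ with h1 h2
    · have hns : ¬ fd.2 ⊆ r := by
        rw [Bool.not_eq_true'] at h2
        exact (pv_sub_false_iff _ _).1 h2
      obtain ⟨x, hx, hxr⟩ := pv_not_subset hns
      have ha := pv_length_update_strict hx hxr (s := r) (l := fd.2)
      have hb := (pvBPass_grows p (PySem.Set.update r fd.2, rem, true)).2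
      exact lt_of_lt_of_le ha hb
    · exact ih r rem hn h
    · exact ih r (rem ++ [fd]) hn h

-- ---- B loop ----
theorem pvBLoop_grows (f : Nat) (r : List String) (p : List (List String × List String)) :
    r ⊆ pvBLoop f r p := by
  induction f generalizing r p with
  | zero => exact fun _ hx => hx
  | succ f ih =>
    show r ⊆ (if (pvBPass p (r, [], false)).2.2 then
      pvBLoop f (pvBPass p (r, [], false)).1 (pvBPass p (r, [], false)).2.1
      else (pvBPass p (r, [], false)).1)
    have h1 := (pvBPass_grows p (r, [], false)).1
    split_ifs with hb
    · exact List.Subset.trans h1 (ih _ _)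
    · exact h1

theorem pvBLoop_sound (f : Nat) (r : List String) (p : List (List String × List String))
    {T : List String} (h : r ⊆ T) (hT : pvClosed p T) : pvBLoop f r p ⊆ T := by
  induction f generalizing r p with
  | zero => exact h
  | succ f ih =>
    show (if (pvBPass p (r, [], false)).2.2 then
      pvBLoop f (pvBPass p (r, [], false)).1 (pvBPass p (r, [], false)).2.1
      else (pvBPass p (r, [], false)).1) ⊆ T
    have h1 := pvBPass_sound p (r, [], false) h hT
    have hT' : pvClosed (pvBPass p (r, [], false)).2.1 T := by
      intro g hg
      have := pvBPass_rem p (r, [], false) hg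
      simp only [List.nil_append] at this
      exact hT g this
    split_ifs with hb
    · exact ih _ _ h1 hT'
    · exact h1

theorem pvBLoop_nodup (f : Nat) (r : List String) (p : List (List String × List String))
    (hn : r.Nodup) : (pvBLoop f r p).Nodup := by
  induction f generalizing r p with
  | zero => exact hn
  | succ f ih =>
    show (if (pvBPass p (r, [], false)).2.2 then
      pvBLoop f (pvBPass p (r, [], false)).1 (pvBPass p (r, [], false)).2.1
      else (pvBPass p (r, [], false)).1).Nodup
    have h1 := pvBPass_nodup p (r, [], false) hn
    split_ifs with hb
    · exact ih _ _ h1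
    · exact h1

theorem pvBLoop_complete (f : Nat) (r : List String) (p G : List (List String × List String))
    {U : List String} (hn : r.Nodup) (h : r ⊆ U) (hF : ∀ fd ∈ p, fd.2 ⊆ U)
    (hinv : ∀ fd ∈ G, fd ∈ p ∨ fd.2 ⊆ r) (hf : U.length + 1 ≤ f + r.length) :
    pvClosed G (pvBLoop f r p) := by
  induction f generalizing r p with
  | zero =>
    have := pv_nodup_length_le hn h
    omega
  | succ f ih =>
    show pvClosed G (if (pvBPass p (r, [], false)).2.2 then
      pvBLoop f (pvBPass p (r, [], false)).1 (pvBPass p (r, [], false)).2.1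
      else (pvBPass p (r, [], false)).1)
    have hremP : ∀ fd ∈ (pvBPass p (r, [], false)).2.1, fd ∈ p := by
      intro g hg
      have := pvBPass_rem p (r, [], false) hg
      simpa using this
    split_ifs with hb
    · refine ih _ _ (pvBPass_nodup p (r, [], false) hn) (pvBPass_subU p (r, [], false) h hF)
        (fun g hg => hF g (hremP g hg)) ?_
        (by have := pvBPass_strict p r [] hn hb; omega)
      -- invariant is preserved by the pass
      intro g hg
      rcases hinv g hg with hp | hr
      · exact pvBPass_inv p (r, [], false) g hp
      · exact Or.inr (List.Subset.trans hr (pvBPass_grows p (r, [], false)).1)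
    · rw [Bool.not_eq_true] at hb
      obtain ⟨heq, hcl⟩ := pvBPass_false p r [] hb
      rw [heq]
      intro g hg hl
      rcases hinv g hg with hp | hr
      · exact hcl g hp hl
      · exact hr

-- ---- main ----
theorem attr_closure_d_eq (attributes : List String) (fds : List (List String × List String))
    (relations : List (List String)) :
    attr_closure_d attributes fds relations = attr_closure_d_alt attributes fds relations := by
  classical
  set U := attributes ++ fds.flatMap (fun fd => fd.2) with hU
  set N := U.length + 1 with hN
  set RA := pvOuterLoop N fds relations (PySem.Set.ofList attributes) with hRA
  set RB := pvBLoop N (PySem.Set.ofList attributes) (pvG fds relations) with hRB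
  have h0 : PySem.Set.ofList attributes ⊆ U := fun x hx =>
    List.mem_append_left _ ((PySem.Set.mem_ofList _ _).1 hx)
  have hn0 : (PySem.Set.ofList attributes).Nodup := PySem.Set.nodup_ofList _
  have hflat : fds.flatMap (fun fd => fd.2) ⊆ U := fun x hx => List.mem_append_right _ hx
  have hGU : ∀ fd ∈ pvG fds relations, fd.2 ⊆ U := by
    intro fd hfd
    obtain ⟨rel, _, hfd'⟩ := pvG_mem.1 hfd
    intro x hx
    exact hflat (List.mem_flatMap.2 ⟨fd, (pvProj_mem hfd').1, hx⟩)
  have hA_closed : pvClosed (pvG fds relations) RA :=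
    pvOuterLoop_complete N fds relations _ hn0 h0 hflat (by omega)
  have hA_nodup : RA.Nodup := pvOuterLoop_nodup N fds relations _ hn0
  have hB_closed : pvClosed (pvG fds relations) RB :=
    pvBLoop_complete N _ (pvG fds relations) (pvG fds relations) hn0 h0 hGU
      (fun fd hfd => Or.inl hfd) (by omega)
  have hB_nodup : RB.Nodup := pvBLoop_nodup N _ _ hn0
  have hAB : RA ⊆ RB := by
    refine pvOuterLoop_sound N fds relations _ (pvBLoop_grows N _ _) ?_
    intro rel hrel fd hfd
    exact hB_closed fd (pvG_mem.2 ⟨rel, hrel, hfd⟩)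
  have hBA : RB ⊆ RA :=
    pvBLoop_sound N _ _ (pvOuterLoop_grows N fds relations _) hA_closed
  have hperm : RA.Perm RB :=
    (List.perm_ext_iff_of_nodup hA_nodup hB_nodup).2 (fun a => ⟨fun h => hAB h, fun h => hBA h⟩)
  show PySem.List.sorted RA (fun x => x) false = PySem.List.sorted RB (fun x => x) false
  exact PySem.List.sorted_eq_sorted_of_perm RA RB (fun x => x) (fun a b h => h) hperm

-- ===== VERDICT (by name: the statement is the Claim_ definition above) =====
theorem attr_closure_d_spec : Claim_equal_attr_closure_d := by
  intro attributes fds relations _hdom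
  unfold Spec_attr_closure_d
  exact attr_closure_d_eq attributes fds relations
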